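-- pv_equiv track=rewrite | github.com/InfiniteLoop360/GFG_POTD | Tywin's War Strategy.py | minSoldiers
-- ===== SOURCE A (Python) =====
-- import math
--
-- def minSoldiers(arr, k):
--     n = len(arr)
--     target = math.ceil(n / 2)
--
--     lucky_count = 0
--     costs = []
--
--     for soldiers in arr:
--         if soldiers % k == 0:
--             lucky_count += 1
--         else:
--             cost = k - (soldiers % k)
--             costs.append(cost)
--
--     # Already enough lucky troops
--     if lucky_count >= target:
--         return 0
--
--     # Need to convert some troops
--     need = target - lucky_count
--     costs.sort()
--
--     return sum(costs[:need])
-- ===== SOURCE B (Python) =====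
-- def minSoldiers(arr, k):
--     n = len(arr)
--     target = (n + 1) // 2
--     costs = [k - s % k for s in arr if s % k != 0]
--     lucky = n - len(costs)
--     if lucky >= target:
--         return 0
--     need = target - lucky
--     # select the need-th smallest cost t by binary search on the VALUE range
--     # (no sorting): t is the least value with at least `need` costs <= t
--     lo, hi = min(costs), max(costs)
--     while lo < hi:
--         mid = (lo + hi) // 2
--         if sum(1 for c in costs if c <= mid) >= need:
--             hi = mid
--         else:
--             lo = mid + 1
--     below_sum = 0
--     below_cnt = 0
--     for c in costs:
--         if c < lo:
--             below_sum += c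
--             below_cnt += 1
--     return below_sum + (need - below_cnt) * lo
-- ===== Notes on version B (the rewrite author's own statement) =====
-- stated objective: alternative
-- what changed: Replaces sort-and-sum-a-prefix with a sort-free selection: binary search on the cost VALUE range for the need-th smallest cost t, then one pass summing costs below t plus the remaining copies of t.
import Mathlib
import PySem

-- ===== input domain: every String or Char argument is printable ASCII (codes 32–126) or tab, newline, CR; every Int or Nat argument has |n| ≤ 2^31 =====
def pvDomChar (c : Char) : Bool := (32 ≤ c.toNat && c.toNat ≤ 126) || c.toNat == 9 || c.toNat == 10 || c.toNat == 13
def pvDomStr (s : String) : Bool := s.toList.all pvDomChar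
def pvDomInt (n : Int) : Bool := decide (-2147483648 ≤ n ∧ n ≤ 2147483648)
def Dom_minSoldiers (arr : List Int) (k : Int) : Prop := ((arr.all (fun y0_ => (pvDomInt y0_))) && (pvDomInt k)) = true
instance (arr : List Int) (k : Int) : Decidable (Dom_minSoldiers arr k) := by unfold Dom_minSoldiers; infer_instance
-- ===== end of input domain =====

-- B replaces A's sort-the-cost-list-and-sum-a-prefix with a sort-free selection: a binary search
-- on the cost VALUE range finds the need-th smallest cost t, then one pass sums the costs below t
-- plus the remaining copies of t (objective: alternative).

-- ===== PORT A =====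
-- math.ceil(n / 2) for n = len(arr) ≥ 0 is ported as (n + 1) // 2 (exact: n/2 is an exact binary float here)
def minSoldiers (arr : List Int) (k : Int) : Int :=
  let n : Int := arr.length
  let target : Int := PySem.Int.floordiv (n + 1) 2
  let st := arr.foldl (fun (st : Int × List Int) soldiers =>
      if PySem.Int.mod soldiers k = 0 then (st.1 + 1, st.2)
      else (st.1, st.2 ++ [k - PySem.Int.mod soldiers k])) (0, [])
  if st.1 ≥ target then 0
  else
    let need := target - st.1
    (PySem.List.slice (PySem.List.sorted st.2 (fun x => x) false) none (some need)).sum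

-- ===== PORT B =====
-- Source B's while-loop: binary search on the value range for the least t with ≥ need costs ≤ t
def pvBSearch (costs : List Int) (need lo hi : Int) : Int :=
  if h : lo < hi then
    let mid := PySem.Int.floordiv (lo + hi) 2
    if need ≤ (costs.countP (fun c => decide (c ≤ mid)) : Int) then pvBSearch costs need lo mid
    else pvBSearch costs need (mid + 1) hi
  else lo
termination_by (hi - lo).toNat
decreasing_by
  · have hb := PySem.Int.floordiv_lt_iff_lt_mul (a := lo + hi) (b := 2) (q := hi) (by omega)
    have : PySem.Int.floordiv (lo + hi) 2 < hi := hb.mpr (by omega)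
    omega
  · have hb := PySem.Int.le_floordiv_iff_mul_le (a := lo + hi) (b := 2) (q := lo) (by omega)
    have : lo ≤ PySem.Int.floordiv (lo + hi) 2 := hb.mpr (by omega)
    omega

def minSoldiers_alt (arr : List Int) (k : Int) : Int :=
  let n : Int := arr.length
  let target : Int := PySem.Int.floordiv (n + 1) 2
  let costs := arr.filterMap (fun s =>
      if PySem.Int.mod s k = 0 then none else some (k - PySem.Int.mod s k))
  let lucky := n - (costs.length : Int)
  if lucky ≥ target then 0
  else
    let need := target - lucky
    -- min(costs)/max(costs): costs is provably nonempty on this branch, the none arm is unreachable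
    match PySem.List.min? costs (fun x => x), PySem.List.max? costs (fun x => x) with
    | some lo0, some hi0 =>
      let t := pvBSearch costs need lo0 hi0
      let st := costs.foldl (fun (st : Int × Int) c =>
          if c < t then (st.1 + c, st.2 + 1) else st) (0, 0)
      st.1 + (need - st.2) * t
    | _, _ => 0

-- ===== PRECONDITION & SPEC =====
-- Pre_ excludes k = 0 with a nonempty arr, where Python's '%' raises ZeroDivisionError (in A and
-- in B alike); with arr = [] no '%' is evaluated and both return 0.
def Pre_minSoldiers (arr : List Int) (k : Int) : Prop := arr = [] ∨ k ≠ 0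
instance (arr : List Int) (k : Int) : Decidable (Pre_minSoldiers arr k) := by unfold Pre_minSoldiers; infer_instance
def pvWitness_minSoldiers : List Int × Int := ([3, 4, 5], 3)

def Spec_minSoldiers (arr : List Int) (k : Int) (out : Int) : Prop := out = minSoldiers_alt arr k
instance (arr : List Int) (k : Int) (out : Int) : Decidable (Spec_minSoldiers arr k out) := by unfold Spec_minSoldiers; infer_instance

-- ===== CLAIM (what is proved, stated in full; the proofs are below) =====
def Claim_equal_minSoldiers : Prop := ∀ (arr : List Int) (k : Int), Dom_minSoldiers arr k → Pre_minSoldiers arr k → Spec_minSoldiers arr k (minSoldiers arr k)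

-- ===== LEMMAS AND PROOFS =====

-- the multiset of conversion costs both programs derive from arr
def pvCosts (arr : List Int) (k : Int) : List Int :=
  arr.filterMap (fun s => if PySem.Int.mod s k = 0 then none else some (k - PySem.Int.mod s k))

-- A's single pass over arr: counts the lucky troops and appends the conversion costs
lemma a_fold_eq (arr : List Int) (k : Int) : ∀ (l : Int) (cs : List Int),
    arr.foldl (fun (st : Int × List Int) soldiers =>
      if PySem.Int.mod soldiers k = 0 then (st.1 + 1, st.2)
      else (st.1, st.2 ++ [k - PySem.Int.mod soldiers k])) (l, cs)
    = (l + ((arr.filter (fun s => PySem.Int.mod s k = 0)).length : Int), cs ++ pvCosts arr k) := by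
  induction arr with
  | nil => intro l cs; simp [pvCosts]
  | cons x xs ih =>
    intro l cs
    by_cases h : PySem.Int.mod x k = 0
    · simp [h, ih, pvCosts]; ring
    · simp [h, ih, pvCosts]

-- the lucky count and the cost count partition arr
lemma lucky_len (arr : List Int) (k : Int) :
    (arr.filter (fun s => PySem.Int.mod s k = 0)).length + (pvCosts arr k).length = arr.length := by
  induction arr with
  | nil => simp [pvCosts]
  | cons x xs ih =>
    by_cases h : PySem.Int.mod x k = 0 <;> simp [pvCosts, h] at ih ⊢ <;> omega

-- B's closing pass: sums and counts the costs strictly below t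
lemma below_fold_eq (C : List Int) (t : Int) : ∀ (s c0 : Int),
    C.foldl (fun (st : Int × Int) c => if c < t then (st.1 + c, st.2 + 1) else st) (s, c0)
    = (s + (C.filter (fun c => decide (c < t))).sum, c0 + ((C.filter (fun c => decide (c < t))).length : Int)) := by
  induction C with
  | nil => intro s c0; simp
  | cons x xs ih =>
    intro s c0
    by_cases h : x < t
    · simp [h, ih]; constructor <;> ring
    · simp [h, ih]

-- counting ≤ t splits into counting < t and counting = t
lemma countP_le_split (C : List Int) (t : Int) :
    C.countP (fun c => decide (c ≤ t)) = C.countP (fun c => decide (c < t)) + C.count t := by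
  induction C with
  | nil => simp
  | cons x xs ih =>
    simp only [List.countP_cons, List.count_cons, ih]
    rcases lt_trichotomy x t with h | h | h
    · have h1 : decide (x ≤ t) = true := by simp; omega
      have h2 : decide (x < t) = true := by simp [h]
      have h3 : (x == t) = false := by simp; omega
      simp [h1, h2, h3]
      omega
    · subst h
      simp
      omega
    · have h1 : decide (x ≤ t) = false := by simp; omega
      have h2 : decide (x < t) = false := by simp; omega
      have h3 : (x == t) = false := by simp; omega
      simp [h1, h2, h3]

lemma countP_le_mono (C : List Int) {m m' : Int} (h : m ≤ m') :
    C.countP (fun c => decide (c ≤ m)) ≤ C.countP (fun c => decide (c ≤ m')) := by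
  apply List.countP_mono_left
  intro a _ ha
  simp at ha ⊢
  omega

-- binary-search specification: starting from an interval whose right end satisfies
-- P m := need ≤ count(≤ m) and with no point below the left end satisfying it,
-- pvBSearch returns the least value satisfying P
lemma bsearch_spec (C : List Int) (need : Int) : ∀ (lo hi : Int), lo ≤ hi →
    need ≤ (C.countP (fun c => decide (c ≤ hi)) : Int) →
    (∀ x, x < lo → ¬ need ≤ (C.countP (fun c => decide (c ≤ x)) : Int)) →
    need ≤ (C.countP (fun c => decide (c ≤ pvBSearch C need lo hi)) : Int) ∧
    (∀ x, x < pvBSearch C need lo hi → ¬ need ≤ (C.countP (fun c => decide (c ≤ x)) : Int)) := by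
  intro lo hi
  induction lo, hi using pvBSearch.induct C need with
  | case1 lo hi h mid hc ih =>
    intro _ hhi hlo
    have hmid : lo ≤ mid ∧ mid ≤ hi := PySem.Int.floordiv_two_mid_bounds (by omega)
    rw [pvBSearch, dif_pos h, if_pos hc]
    exact ih hmid.1 hc hlo
  | case2 lo hi h mid hc ih =>
    intro _ hhi hlo
    have hb := PySem.Int.floordiv_lt_iff_lt_mul (a := lo + hi) (b := 2) (q := hi) (by omega)
    have hmidhi : mid < hi := hb.mpr (by omega)
    rw [pvBSearch, dif_pos h, if_neg hc]
    refine ih (by omega) hhi ?_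
    intro x hx hle
    by_cases hxm : x ≤ mid
    · exact hc (le_trans hle (by exact_mod_cast countP_le_mono C hxm))
    · omega
  | case3 lo hi h =>
    intro hle hhi hlo
    rw [pvBSearch, dif_neg h]
    have : lo = hi := by omega
    subst this
    exact ⟨hhi, hlo⟩

-- selection identity: if count(< t) < need ≤ count(≤ t), the sum of the `need` smallest
-- elements of C is the sum of the elements below t plus the missing copies of t
lemma select_sum (C : List Int) (t need : Int)
    (h1 : (C.countP (fun c => decide (c < t)) : Int) < need)
    (h2 : need ≤ (C.countP (fun c => decide (c ≤ t)) : Int)) :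
    ((PySem.List.sorted C (fun x => x) false).take need.toNat).sum
      = (C.filter (fun c => decide (c < t))).sum
        + (need - (C.countP (fun c => decide (c < t)) : Int)) * t := by
  set L := C.filter (fun c => decide (c < t)) with hL
  set G := C.filter (fun c => decide (t < c)) with hG
  set m : Nat := C.count t with hm
  have hsplit := countP_le_split C t
  have hlenL : L.length = C.countP (fun c => decide (c < t)) := by
    rw [hL, List.countP_eq_length_filter]
  -- the sorted list is: sorted smaller part, then the copies of t, then sorted larger part
  have hperm : ((PySem.List.sorted L (fun x => x) false ++ List.replicate m t)
       ++ PySem.List.sorted G (fun x => x) false).Perm C := by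
    apply (List.perm_iff_count).mpr
    intro x
    have pL : (PySem.List.sorted L (fun x => x) false).Perm L := PySem.List.sorted_perm _ _ _
    have pG : (PySem.List.sorted G (fun x => x) false).Perm G := PySem.List.sorted_perm _ _ _
    rw [List.count_append, List.count_append, pL.count_eq, pG.count_eq,
        List.count_replicate]
    rcases lt_trichotomy x t with h | h | h
    · have hLc : L.count x = C.count x := by
        rw [hL]; exact List.count_filter (by simp [h])
      have hGc : G.count x = 0 := by
        rw [List.count_eq_zero]
        intro hmem
        have := List.of_mem_filter hmem
        simp at this
        omega
      have hne : (t == x) = false := by simp; omega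
      rw [hLc, hGc, hne]
      simp
    · subst h
      have hLc : L.count x = 0 := by
        rw [List.count_eq_zero]
        intro hmem
        have := List.of_mem_filter hmem
        simp at this
      have hGc : G.count x = 0 := by
        rw [List.count_eq_zero]
        intro hmem
        have := List.of_mem_filter hmem
        simp at this
      rw [hLc, hGc]
      simp [hm]
    · have hLc : L.count x = 0 := by
        rw [List.count_eq_zero]
        intro hmem
        have := List.of_mem_filter hmem
        simp at this
        omega
      have hGc : G.count x = C.count x := by
        rw [hG]; exact List.count_filter (by simp [h])
      have hne : (t == x) = false := by simp; omega
      rw [hLc, hGc, hne]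
      simp
  have hsorted : PySem.List.sorted C (fun x => x) false
      = (PySem.List.sorted L (fun x => x) false ++ List.replicate m t)
        ++ PySem.List.sorted G (fun x => x) false := by
    apply PySem.List.sorted_id_eq_of_perm_of_pairwise _ _ hperm
    rw [List.pairwise_append, List.pairwise_append]
    refine ⟨⟨(PySem.List.sorted_pairwise _ _).imp (fun h => h),
            List.pairwise_replicate.mpr (Or.inr le_rfl), ?_⟩, ?_, ?_⟩
    · intro a ha b hb
      have : a ∈ L := (PySem.List.sorted_perm L _ _).mem_iff.mp ha
      have ha' : a < t := by have := List.of_mem_filter this; simpa using this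
      have : b = t := List.eq_of_mem_replicate hb
      omega
    · exact (PySem.List.sorted_pairwise _ _).imp (fun h => h)
    · intro a ha b hb
      have hb' : b ∈ G := (PySem.List.sorted_perm G _ _).mem_iff.mp hb
      have hbt : t < b := by have := List.of_mem_filter hb'; simpa using this
      rcases List.mem_append.mp ha with h | h
      · have : a ∈ L := (PySem.List.sorted_perm L _ _).mem_iff.mp h
        have : a < t := by have := List.of_mem_filter this; simpa using this
        omega
      · have : a = t := List.eq_of_mem_replicate h
        omega
  have hlenL' : (PySem.List.sorted L (fun x => x) false).length
      = C.countP (fun c => decide (c < t)) := by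
    rw [(PySem.List.sorted_perm L (fun x => x) false).length_eq, hlenL]
  set b : Nat := C.countP (fun c => decide (c < t)) with hb
  have hbn : b < need.toNat ∧ need.toNat ≤ b + m := by
    constructor <;> omega
  have htake : (PySem.List.sorted C (fun x => x) false).take need.toNat
      = PySem.List.sorted L (fun x => x) false ++ List.replicate (need.toNat - b) t := by
    rw [hsorted, List.append_assoc, List.take_append, hlenL']
    rw [List.take_of_length_le (by rw [hlenL']; omega), List.take_append, List.take_replicate,
        List.length_replicate]
    have h1 : min (need.toNat - b) m = need.toNat - b := by omega
    have h2 : need.toNat - b - m = 0 := by omega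
    rw [h1, h2]
    simp
  rw [htake, List.sum_append, List.sum_replicate, nsmul_eq_mul,
      (PySem.List.sorted_perm L (fun x => x) false).sum_eq]
  have : ((need.toNat - b : Nat) : Int) = need - (b : Int) := by omega
  rw [this]

-- the two ports agree
theorem minSoldiers_spec_core (arr : List Int) (k : Int) :
    minSoldiers arr k = minSoldiers_alt arr k := by
  simp only [minSoldiers, minSoldiers_alt]
  rw [a_fold_eq arr k 0 []]
  simp only [List.nil_append, zero_add]
  set C := pvCosts arr k with hC
  have hCeq : arr.filterMap (fun s =>
      if PySem.Int.mod s k = 0 then none else some (k - PySem.Int.mod s k)) = C := rfl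
  rw [hCeq]
  have hlen := lucky_len arr k
  have hlucky : ((arr.filter (fun s => PySem.Int.mod s k = 0)).length : Int)
      = (arr.length : Int) - (C.length : Int) := by rw [← hC] at hlen; omega
  rw [hlucky]
  set n : Int := (arr.length : Int) with hn
  set target : Int := PySem.Int.floordiv (n + 1) 2 with htarget
  set lucky : Int := n - (C.length : Int) with hlky
  by_cases hge : lucky ≥ target
  · rw [if_pos hge, if_pos hge]
  · rw [if_neg hge, if_neg hge]
    set need : Int := target - lucky with hneed
    have hn0 : 0 ≤ n := by positivity
    have hlenC : (C.length : Int) ≤ n := by omega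
    have htb : target ≤ n ∧ 0 ≤ target := by
      rw [htarget, PySem.Int.floordiv_eq_ediv_of_pos (by omega)]
      constructor <;> omega
    have hneed1 : 1 ≤ need := by omega
    have hneedlen : need ≤ (C.length : Int) := by omega
    have hCne : C ≠ [] := by
      intro h; rw [h] at hneedlen; simp at hneedlen; omega
    obtain ⟨lo0, hlo⟩ : ∃ v, PySem.List.min? C (fun x => x) = some v := by
      cases hv : PySem.List.min? C (fun x => x) with
      | none => exact absurd ((PySem.List.min?_eq_none_iff _ _).mp hv) hCne
      | some v => exact ⟨v, rfl⟩
    obtain ⟨hi0, hhi⟩ : ∃ v, PySem.List.max? C (fun x => x) = some v := by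
      cases hv : PySem.List.max? C (fun x => x) with
      | none => exact absurd ((PySem.List.max?_eq_none_iff _ _).mp hv) hCne
      | some v => exact ⟨v, rfl⟩
    rw [hlo, hhi]
    simp only []
    have hlomem : lo0 ∈ C := PySem.List.min?_mem hlo
    have hlomin : ∀ y ∈ C, lo0 ≤ y := PySem.List.min?_isMin hlo
    have hhimax : ∀ y ∈ C, y ≤ hi0 := PySem.List.max?_isMax hhi
    -- the binary search is over a valid bracket
    have hinit1 : need ≤ (C.countP (fun c => decide (c ≤ hi0)) : Int) := by
      have : C.countP (fun c => decide (c ≤ hi0)) = C.length := by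
        apply List.countP_eq_length.mpr
        intro a ha; simpa using hhimax a ha
      rw [this]; exact hneedlen
    have hinit2 : ∀ x, x < lo0 → ¬ need ≤ (C.countP (fun c => decide (c ≤ x)) : Int) := by
      intro x hx hle
      have : C.countP (fun c => decide (c ≤ x)) = 0 := by
        apply List.countP_eq_zero.mpr
        intro a ha
        have := hlomin a ha
        simp; omega
      rw [this] at hle; simp at hle; omega
    have hbr := bsearch_spec C need lo0 hi0 (hlomin hi0 (PySem.List.max?_mem hhi)) hinit1 hinit2
    set t := pvBSearch C need lo0 hi0 with ht
    -- count(< t) < need ≤ count(≤ t)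
    have hlt : (C.countP (fun c => decide (c < t)) : Int) < need := by
      have h1 := hbr.2 (t - 1) (by omega)
      have h2 : C.countP (fun c => decide (c ≤ t - 1)) = C.countP (fun c => decide (c < t)) := by
        apply List.countP_congr
        intro a _; constructor <;> (intro h; simp at h ⊢; omega)
      rw [h2] at h1; omega
    rw [below_fold_eq C t 0 0]
    simp only [zero_add]
    rw [← List.countP_eq_length_filter]
    rw [show PySem.List.slice (PySem.List.sorted C (fun x => x) false) none (some need)
        = (PySem.List.sorted C (fun x => x) false).take need.toNat from by
      rw [show need = ((need.toNat : Nat) : Int) from (Int.toNat_of_nonneg (by omega)).symm]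
      exact PySem.List.slice_to_natCast _ _]
    rw [select_sum C t need hlt hbr.1]

-- ===== VERDICT (by name: the statement is the Claim_ definition above) =====
theorem minSoldiers_spec : Claim_equal_minSoldiers := by
  intro arr k _ _
  unfold Spec_minSoldiers
  exact minSoldiers_spec_core arr k
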